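-- pv_equiv track=rewrite | github.com/harshilkhara/LeetCode_qts | getSmallestString.py | getSmallestString1
-- ===== SOURCE A (Python) =====
-- def getSmallestString1(n,k): # TC O(n) // SC O(1)
-- 	result=['a']*n
-- 	k-=n
-- 	for position in range(n-1,-1,-1):
-- 	    add=min(k,25)
-- 	    result[position]=chr(ord("a")+add)
-- 	    k-=add
-- 	return "".join(result)
-- ===== SOURCE B (Python) =====
-- def getSmallestString1(n, k):
--     # closed form: q trailing 'z's, one remainder char, leading 'a's
--     q, r = divmod(k - n, 25)
--     if q >= n:
--         return 'z' * n
--     return 'a' * (n - q - 1) + chr(ord('a') + r) + 'z' * q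
-- ===== Notes on version B (the rewrite author's own statement) =====
-- stated objective: simpler
-- what changed: Replaces A's backward per-position greedy loop with a closed form: divmod(k-n,25) directly gives the count of trailing 'z's and the one remainder character, the rest are 'a's.
-- outside the precondition, e.g. on getSmallestString1(3, 2): A returns 'aa`', B returns 'aaay'; on getSmallestString1(-2, -60): A returns '', B returns 'r'
import Mathlib
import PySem

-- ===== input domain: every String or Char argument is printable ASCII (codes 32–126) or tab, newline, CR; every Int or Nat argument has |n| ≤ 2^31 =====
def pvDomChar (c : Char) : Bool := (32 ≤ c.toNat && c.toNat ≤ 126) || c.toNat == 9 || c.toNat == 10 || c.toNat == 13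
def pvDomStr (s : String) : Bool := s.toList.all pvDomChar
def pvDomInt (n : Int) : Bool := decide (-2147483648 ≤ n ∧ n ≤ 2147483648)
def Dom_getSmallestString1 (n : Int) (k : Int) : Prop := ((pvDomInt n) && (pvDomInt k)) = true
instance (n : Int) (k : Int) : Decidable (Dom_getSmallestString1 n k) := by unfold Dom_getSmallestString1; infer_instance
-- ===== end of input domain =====

-- B replaces A's backward per-position greedy loop by a divmod closed form (q trailing 'z's, one
-- remainder character, leading 'a's).

-- ===== PORT A =====
-- literal port of A: result=['a']*n; k-=n; backward loop assigning chr(ord('a')+min(k,25)).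
def getSmallestString1 (n : Int) (k : Int) : String :=
  let result : List Char := List.replicate n.toNat 'a'   -- ['a']*n ([] for n ≤ 0, as in Python)
  let k := k - n
  let st := (PySem.List.pyRange (n - 1) (-1) (-1)).foldl
    (fun (st : List Char × Int) position =>
      let add := min st.2 25
      (PySem.List.pySetD st.1 position (Char.ofNat (97 + add).toNat), st.2 - add))
    (result, k)
  String.ofList st.1

-- ===== PORT B =====
def getSmallestString1_alt (n : Int) (k : Int) : String :=
  let q := PySem.Int.floordiv (k - n) 25
  let r := PySem.Int.mod (k - n) 25
  if n ≤ q then String.ofList (List.replicate n.toNat 'z')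
  else String.ofList (List.replicate (n - q - 1).toNat 'a'
        ++ [Char.ofNat (97 + r).toNat] ++ List.replicate q.toNat 'z')

-- ===== PRECONDITION & SPEC =====
-- Pre_ admits the problem's natural domain 0 ≤ n ≤ k (LeetCode guarantees n ≤ k ≤ 26n) and the
-- degenerate n < 0 inputs with k ≥ 26n, where both programs return ''. It excludes out-of-domain
-- inputs on which A still returns by accident: for 0 ≤ n and k < n A's greedy step goes negative
-- and emits sub-'a' characters (or raises ValueError for k ≤ n-98), and for n < 0 with k < 26n
-- A returns '' only because its range is empty — values B's closed form does not reproduce.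
def Pre_getSmallestString1 (n : Int) (k : Int) : Prop := (0 ≤ n ∧ n ≤ k) ∨ (n < 0 ∧ 26 * n ≤ k)
instance (n : Int) (k : Int) : Decidable (Pre_getSmallestString1 n k) := by
  unfold Pre_getSmallestString1; infer_instance

def pvWitness_getSmallestString1 : Int × Int := (3, 30)

def Spec_getSmallestString1 (n : Int) (k : Int) (out : String) : Prop := out = getSmallestString1_alt n k
instance (n : Int) (k : Int) (out : String) : Decidable (Spec_getSmallestString1 n k out) := by unfold Spec_getSmallestString1; infer_instance

-- ===== CLAIM (what is proved, stated in full; the proofs are below) =====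
def Claim_equal_getSmallestString1 : Prop := ∀ (n : Int) (k : Int), Dom_getSmallestString1 n k → Pre_getSmallestString1 n k → Spec_getSmallestString1 n k (getSmallestString1 n k)

-- ===== LEMMAS AND PROOFS =====

-- the character A writes when the remaining budget is kk (0 ≤ kk)
def pvChr (kk : Int) : Char := Char.ofNat (97 + kk).toNat

-- closed form of A's loop result for a prefix of length m with remaining budget kk ≥ 0
def pvBody (m : Nat) (kk : Int) : List Char :=
  if 25 * (m : Int) ≤ kk then List.replicate m 'z'
  else List.replicate (m - (kk / 25).toNat - 1) 'a' ++ [pvChr (kk % 25)]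
        ++ List.replicate (kk / 25).toNat 'z'

lemma pv_set_replicate (m : Nat) (suffix : List Char) (c : Char) :
    (List.replicate (m + 1) 'a' ++ suffix).set m c = List.replicate m 'a' ++ c :: suffix := by
  induction m with
  | zero => simp
  | succ m ih => simpa [List.replicate_succ] using ih

lemma pvBody_step (m : Nat) (kk : Int) (h : 0 ≤ kk) :
    pvBody (m + 1) kk = pvBody m (kk - min kk 25) ++ [pvChr (min kk 25)] := by
  by_cases h25 : 25 ≤ kk
  · have hmin : min kk 25 = 25 := by omega
    rw [hmin]
    have hchr : pvChr 25 = 'z' := by decide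
    by_cases hz : 25 * ((m : Int) + 1) ≤ kk
    · have hz' : 25 * (m : Int) ≤ kk - 25 := by omega
      simp only [pvBody, Nat.cast_add, Nat.cast_one, if_pos hz, if_pos hz', hchr,
        List.replicate_succ' (n := m)]
    · have hz' : ¬ 25 * (m : Int) ≤ kk - 25 := by omega
      have hdiv : (kk - 25) / 25 = kk / 25 - 1 := by omega
      have hmod : (kk - 25) % 25 = kk % 25 := by omega
      have hT : (kk / 25 - 1).toNat = (kk / 25).toNat - 1 := by omega
      have hQ : (kk / 25).toNat = ((kk / 25).toNat - 1) + 1 := by omega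
      have hlen : m + 1 - (kk / 25).toNat - 1 = m - ((kk / 25).toNat - 1) - 1 := by omega
      simp only [pvBody, Nat.cast_add, Nat.cast_one, if_neg hz, if_neg hz', hdiv, hmod, hchr,
        hT, hlen]
      rw [hQ, List.replicate_succ' (n := (kk / 25).toNat - 1)]
      simp [List.append_assoc]
  · have hmin : min kk 25 = kk := by omega
    have hz : ¬ 25 * ((m : Int) + 1) ≤ kk := by omega
    have hbody0 : pvBody m 0 = List.replicate m 'a' := by
      cases m with
      | zero => simp [pvBody]
      | succ m =>
        have hz0 : ¬ 25 * ((m : Int) + 1) ≤ 0 := by omega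
        simp only [pvBody, Nat.cast_add, Nat.cast_one, if_neg hz0]
        simp [show pvChr 0 = 'a' from by decide, List.replicate_succ']
    have hmod : kk % 25 = kk := by omega
    have ht0 : (kk / 25).toNat = 0 := by omega
    rw [hmin]
    conv_lhs => rw [pvBody]
    rw [show kk - kk = 0 by omega, hbody0]
    simp [Nat.cast_add, Nat.cast_one, if_neg hz, ht0, hmod]

-- the loop body of port A, named for the invariant proof
def pvStep (st : List Char × Int) (position : Int) : List Char × Int :=
  let add := min st.2 25
  (PySem.List.pySetD st.1 position (Char.ofNat (97 + add).toNat), st.2 - add)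

lemma pv_loop (m : Nat) (kk : Int) (h : 0 ≤ kk) (suffix : List Char) :
    (PySem.List.pyRange ((m : Int) - 1) (-1) (-1)).foldl pvStep
        (List.replicate m 'a' ++ suffix, kk)
      = (pvBody m kk ++ suffix, kk - min kk (25 * m)) := by
  induction m generalizing kk suffix with
  | zero =>
    rw [PySem.List.pyRange_neg_one_eq_nil (by omega)]
    simp [pvBody, h]
  | succ m ih =>
    have hcons : PySem.List.pyRange ((↑(m + 1) : Int) - 1) (-1) (-1)
        = (m : Int) :: PySem.List.pyRange ((m : Int) - 1) (-1) (-1) := by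
      have := PySem.List.pyRange_neg_one_cons (a := (↑(m + 1) : Int) - 1) (b := -1) (by push_cast; omega)
      simpa [Nat.cast_add, Nat.cast_one] using this
    rw [hcons, List.foldl_cons]
    have hset : pvStep (List.replicate (m + 1) 'a' ++ suffix, kk) (m : Int)
        = (List.replicate m 'a' ++ (pvChr (min kk 25) :: suffix), kk - min kk 25) := by
      simp only [pvStep, PySem.List.pySetD_natCast, pvChr]
      rw [pv_set_replicate]
    rw [hset, ih (kk - min kk 25) (by omega)]
    rw [pvBody_step m kk h]
    have : kk - min kk 25 - min (kk - min kk 25) (25 * (m : Int))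
        = kk - min kk (25 * (↑(m + 1) : Int)) := by push_cast; omega
    simp [this]

theorem getSmallestString1_spec_aux (n k : Int) (h0 : 0 ≤ n) (hk : n ≤ k) :
    getSmallestString1 n k = getSmallestString1_alt n k := by
  obtain ⟨m, rfl⟩ : ∃ m : Nat, (m : Int) = n := ⟨n.toNat, by omega⟩
  have hkk : 0 ≤ k - m := by omega
  have hfd : PySem.Int.floordiv (k - m) 25 = (k - m) / 25 := by
    simp [PySem.Int.floordiv, Int.fdiv_eq_ediv]
  have hmd : PySem.Int.mod (k - m) 25 = (k - m) % 25 := by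
    simp [PySem.Int.mod, Int.fmod_eq_emod]
  unfold getSmallestString1 getSmallestString1_alt
  simp only [hfd, hmd]
  have hloop := pv_loop m (k - m) hkk []
  simp only [List.append_nil] at hloop
  show String.ofList ((PySem.List.pyRange ((m : Int) - 1) (-1) (-1)).foldl pvStep
      (List.replicate ((m : Int)).toNat 'a', k - (m : Int))).1 = _
  rw [Int.toNat_natCast, hloop]
  unfold pvBody
  have hq0 : 0 ≤ (k - m) / 25 := by omega
  by_cases hz : (m : Int) ≤ (k - m) / 25
  · have : 25 * (m : Int) ≤ k - m := by omega
    simp [this, hz]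
  · have : ¬ 25 * (m : Int) ≤ k - m := by omega
    have hton : ((m : Int) - (k - m) / 25 - 1).toNat = m - ((k - m) / 25).toNat - 1 := by omega
    simp [this, hz, hton, pvChr]

-- ===== VERDICT (by name: the statement is the Claim_ definition above) =====
theorem getSmallestString1_neg_aux (n k : Int) (hn : n < 0) (hk : 26 * n ≤ k) :
    getSmallestString1 n k = getSmallestString1_alt n k := by
  have ht0 : n.toNat = 0 := by omega
  have hq : n ≤ (k - n) / 25 := by omega
  unfold getSmallestString1 getSmallestString1_alt
  rw [PySem.List.pyRange_neg_one_eq_nil (by omega)]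
  simp [ht0, PySem.Int.floordiv, Int.fdiv_eq_ediv, hq]

theorem getSmallestString1_spec : Claim_equal_getSmallestString1 := by
  intro n k _ hpre
  rcases hpre with ⟨h0, hk⟩ | ⟨hn, hk⟩
  · exact getSmallestString1_spec_aux n k h0 hk
  · exact getSmallestString1_neg_aux n k hn hk
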